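-- pv_equiv track=rewrite | github.com/ekzm8523/CodingTestPractice | python/programmers/naver_webtoon/3.py | solution
-- ===== SOURCE A (Python) =====
-- def is_sorted(arr):
--     prev = arr[0]
--     for i in range(1, len(arr)):
--         if arr[i] < prev:
--             return False
--         prev = arr[i]
--     return True
--
-- def solution(arr, k):
--     answer = 0
--     idx = len(arr) - 1
--
--     while not is_sorted(arr):
--         m = 0
--         ptr = -1
--         for i in range(idx+1):
--             if m < arr[i]:
--                 m = arr[i]
--                 ptr = i
--
--         while ptr < idx:
--             if idx < ptr + k:
--                 arr[ptr], arr[idx] = arr[idx], arr[ptr]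
--
--             else:
--                 arr[ptr], arr[ptr + k] = arr[ptr + k], arr[ptr]
--
--             ptr += k
--             answer += 1
--
--         idx -= 1
--
--     return answer
-- ===== SOURCE B (Python) =====
-- def is_sorted(arr):
--     prev = arr[0]
--     for i in range(1, len(arr)):
--         if arr[i] < prev:
--             return False
--         prev = arr[i]
--     return True
--
-- def solution(arr, k):
--     answer = 0
--     idx = len(arr) - 1
--     while not is_sorted(arr):
--         m = max(arr[:idx + 1])
--         ptr = arr.index(m)
--         answer += (idx - ptr + k - 1) // k
--         stops = list(range(ptr, idx, k)) + [idx]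
--         vals = [arr[p] for p in stops]
--         for p, v in zip(stops, vals[1:] + vals[:1]):
--             arr[p] = v
--         idx -= 1
--     return answer
-- ===== Notes on version B (the rewrite author's own statement) =====
-- stated objective: alternative
-- what changed: The hand-rolled prefix scan and the swap-by-swap counting inner while-loop are replaced by max()/list.index() for the leftmost prefix maximum plus the closed-form jump count ceil((idx-ptr)/k) added at once, with the element movement done as a single left-rotation over the strided stop positions instead of a chain of pairwise swaps.
-- outside the precondition, e.g. on solution([0, -1], 2): A returns 2, B returns 1; on solution([-1, -2], 1): A returns 3, B returns 1; on solution([-2, -1, -3], 1): A does not finish within the time limit, B returns 2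
import Mathlib
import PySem

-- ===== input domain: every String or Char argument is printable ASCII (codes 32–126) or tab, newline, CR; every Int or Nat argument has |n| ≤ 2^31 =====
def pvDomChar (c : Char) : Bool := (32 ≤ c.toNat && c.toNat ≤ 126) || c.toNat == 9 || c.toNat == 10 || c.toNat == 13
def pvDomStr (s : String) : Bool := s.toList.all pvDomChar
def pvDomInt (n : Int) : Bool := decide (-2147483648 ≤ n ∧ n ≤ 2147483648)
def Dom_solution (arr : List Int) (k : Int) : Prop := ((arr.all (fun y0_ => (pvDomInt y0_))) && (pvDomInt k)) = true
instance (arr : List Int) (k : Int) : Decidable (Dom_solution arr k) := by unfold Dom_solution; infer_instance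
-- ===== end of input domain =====

-- B replaces A's hand-rolled prefix scan and swap-by-swap counting inner while-loop by max()/index(),
-- a closed-form jump count and a single left-rotation (objective: alternative decomposition, same cost).
-- Both Pythons mutate `arr` in place (identically on Pre_, checked by test); the theorems are about the RETURN value.

-- ===== PORT A =====
-- is_sorted: `prev = arr[0]` raises IndexError on []; Pre_ excludes [] (the `true` returned here is never relied on).
-- (B's Python calls this same module-level helper.)
def isSortedLoop (prev : Int) : List Int → Bool
  | [] => true
  | x :: xs => if x < prev then false else isSortedLoop x xs

def isSortedA (arr : List Int) : Bool :=
  match arr with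
  | [] => true
  | x :: xs => isSortedLoop x xs

-- for i in range(idx+1): if m < arr[i]: m, ptr = arr[i], i    (every access is in range inside Pre_; default 0 unused)
def findMaxA (arr : List Int) (idx : Int) : Int × Int :=
  (PySem.List.pyRange 0 (idx + 1) 1).foldl
    (fun s i => if s.1 < PySem.List.pyGetD arr i 0 then (PySem.List.pyGetD arr i 0, i) else s)
    (0, -1)

-- arr[a], arr[b] = arr[b], arr[a]
def pySwap (arr : List Int) (a b : Int) : List Int :=
  PySem.List.pySetD (PySem.List.pySetD arr a (PySem.List.pyGetD arr b 0)) b (PySem.List.pyGetD arr a 0)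

-- while ptr < idx: …  (fuel only makes the loop total in Lean: inside Pre_ the loop exits before the fuel runs out, proved below)
def innerA (fuel : Nat) (arr : List Int) (k ptr idx answer : Int) : List Int × Int :=
  match fuel with
  | 0 => (arr, answer)
  | f + 1 =>
    if ptr < idx then
      let arr' := if idx < ptr + k then pySwap arr ptr idx else pySwap arr ptr (ptr + k)
      innerA f arr' k (ptr + k) idx (answer + 1)
    else (arr, answer)

-- while not is_sorted(arr): …  (fuel likewise: inside Pre_ at most len(arr) passes happen)
def outerA (fuel : Nat) (arr : List Int) (k idx answer : Int) : Int :=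
  match fuel with
  | 0 => answer
  | f + 1 =>
    if isSortedA arr then answer
    else
      let ptr := (findMaxA arr idx).2
      let r := innerA (arr.length + 1) arr k ptr idx answer
      outerA f r.1 k (idx - 1) r.2

def solution (arr : List Int) (k : Int) : Int :=
  outerA (arr.length + 1) arr k (PySem.List.len arr - 1) 0

-- ===== PORT B =====
-- stops = list(range(ptr, idx, k)) + [idx]; vals = [arr[p] for p in stops];
-- for p, v in zip(stops, vals[1:] + vals[:1]): arr[p] = v
def rotB (a : List Int) (ptr idx k : Int) : List Int :=
  let stops := PySem.List.pyRange ptr idx k ++ [idx]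
  let vals := stops.map (fun p => PySem.List.pyGetD a p 0)
  (stops.zip (vals.drop 1 ++ vals.take 1)).foldl (fun b pv => PySem.List.pySetD b pv.1 pv.2) a

-- while not is_sorted(arr): m = max(arr[:idx+1]); ptr = arr.index(m); answer += (idx-ptr+k-1)//k; rotate; idx -= 1
-- (inside Pre_ the slice is nonempty and m occurs in arr, so Python's max/index never raise; defaults 0 unused)
def outerB (fuel : Nat) (a : List Int) (k idx answer : Int) : Int :=
  match fuel with
  | 0 => answer
  | f + 1 =>
    if isSortedA a then answer
    else
      let m := (PySem.List.max? (PySem.List.slice a none (some (idx + 1))) (fun x => x)).getD 0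
      let ptr : Int := ((PySem.List.index? a m).getD 0 : Nat)
      outerB f (rotB a ptr idx k) k (idx - 1) (answer + PySem.Int.floordiv (idx - ptr + k - 1) k)

def solution_alt (arr : List Int) (k : Int) : Int :=
  outerB (arr.length + 1) arr k (PySem.List.len arr - 1) 0

-- ===== PRECONDITION & SPEC =====
-- Pre_ excludes the empty list (A's is_sorted raises IndexError) and unsorted inputs with k ≤ 0 or
-- with a negative element: there A either diverges (a jump of k ≤ 0 never advances; the `m = 0` seed
-- leaves ptr = -1 on an all-nonpositive prefix, looping forever) or, when it does return, its count
-- comes from swaps through Python's negative-index wraparound at arr[-1], which B does not reproduce.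
def Pre_solution (arr : List Int) (k : Int) : Prop :=
  arr ≠ [] ∧ (arr.Pairwise (· ≤ ·) ∨ (1 ≤ k ∧ ∀ x ∈ arr, 0 ≤ x))
instance (arr : List Int) (k : Int) : Decidable (Pre_solution arr k) := by unfold Pre_solution; infer_instance

def pvWitness_solution : List Int × Int := ([3, 1, 2], 2)

def Spec_solution (arr : List Int) (k : Int) (out : Int) : Prop := out = solution_alt arr k
instance (arr : List Int) (k : Int) (out : Int) : Decidable (Spec_solution arr k out) := by unfold Spec_solution; infer_instance

-- ===== CLAIM (what is proved, stated in full; the proofs are below) =====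
def Claim_equal_solution : Prop := ∀ (arr : List Int) (k : Int), Dom_solution arr k → Pre_solution arr k → Spec_solution arr k (solution arr k)
-- ===== LEMMAS AND PROOFS =====

theorem isSortedLoop_iff (l : List Int) : ∀ prev, isSortedLoop prev l = true ↔ List.Pairwise (· ≤ ·) (prev :: l) := by
  induction l with
  | nil => intro prev; simp [isSortedLoop]
  | cons x xs ih =>
    intro prev
    by_cases h : x < prev
    · simp only [isSortedLoop, if_pos h, List.pairwise_cons]
      constructor
      · intro hh; simp at hh
      · rintro ⟨h1, -⟩
        have := h1 x (by simp); omega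
    · simp only [isSortedLoop, if_neg h, ih, List.pairwise_cons]
      constructor
      · rintro ⟨h1, h2⟩
        refine ⟨?_, h1, h2⟩
        intro y hy
        rcases List.mem_cons.mp hy with hy | hy
        · subst hy; omega
        · have := h1 y hy; omega
      · rintro ⟨-, h1, h2⟩; exact ⟨h1, h2⟩

theorem isSortedA_iff (a : List Int) : isSortedA a = true ↔ a.Pairwise (· ≤ ·) := by
  cases a with
  | nil => simp [isSortedA]
  | cons x xs => simp [isSortedA, isSortedLoop_iff]

-- ---------- generic pySetD / pySwap facts ----------

theorem pySetD_pySetD (x : List Int) (q w v : Int) (hq : 0 ≤ q) :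
    PySem.List.pySetD (PySem.List.pySetD x q w) q v = PySem.List.pySetD x q v := by
  rw [PySem.List.pySetD_of_nonneg _ _ hq, PySem.List.pySetD_of_nonneg _ _ hq,
      PySem.List.pySetD_of_nonneg _ _ hq, List.set_set]

theorem pyGetD_pySetD_self (a : List Int) (i v : Int) (h0 : 0 ≤ i) (h : i < a.length) :
    PySem.List.pyGetD (PySem.List.pySetD a i v) i 0 = v := by
  rw [PySem.List.pySetD_of_nonneg _ _ h0,
      PySem.List.pyGetD_eq_getElem _ _ h0 (by simp; omega), List.getElem_set_self]

theorem pyGetD_pySetD_ne (a : List Int) (i q v : Int) (h0i : 0 ≤ i) (hi : i < a.length)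
    (h0q : 0 ≤ q) (hne : q ≠ i) :
    PySem.List.pyGetD (PySem.List.pySetD a i v) q 0 = PySem.List.pyGetD a q 0 := by
  rw [PySem.List.pySetD_of_nonneg _ _ h0i]
  by_cases hq : q < a.length
  · rw [PySem.List.pyGetD_eq_getElem _ _ h0q (by simp; omega),
        PySem.List.pyGetD_eq_getElem _ _ h0q (by omega),
        List.getElem_set_ne (by omega)]
  · have e1 : PySem.List.pyGetD (a.set i.toNat v) q 0 = 0 :=
      PySem.List.pyGetD_of_none _ _ _ ((PySem.List.pyGet?_eq_none_iff _ _).mpr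
        (by unfold PySem.Raise.InRange; simp; omega))
    have e2 : PySem.List.pyGetD a q 0 = 0 :=
      PySem.List.pyGetD_of_none _ _ _ ((PySem.List.pyGet?_eq_none_iff _ _).mpr
        (by unfold PySem.Raise.InRange; omega))
    rw [e1, e2]

theorem length_pySwap (a : List Int) (i j : Int) : (pySwap a i j).length = a.length := by
  simp [pySwap, PySem.List.length_pySetD]

theorem swap_get_snd (a : List Int) (i j : Int) (h0j : 0 ≤ j) (hj : j < a.length) :
    PySem.List.pyGetD (pySwap a i j) j 0 = PySem.List.pyGetD a i 0 := by
  unfold pySwap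
  exact pyGetD_pySetD_self _ _ _ h0j (by simp [PySem.List.length_pySetD]; omega)

theorem swap_get_other (a : List Int) (i j q : Int) (h0i : 0 ≤ i) (hi : i < a.length)
    (h0j : 0 ≤ j) (hj : j < a.length) (h0q : 0 ≤ q) (hqi : q ≠ i) (hqj : q ≠ j) :
    PySem.List.pyGetD (pySwap a i j) q 0 = PySem.List.pyGetD a q 0 := by
  unfold pySwap
  rw [pyGetD_pySetD_ne _ _ _ _ h0j (by simp [PySem.List.length_pySetD]; omega) h0q hqj,
      pyGetD_pySetD_ne _ _ _ _ h0i hi h0q hqi]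

theorem count_set_add (l : List Int) (n : Nat) (v a : Int) (h : n < l.length) :
    (l.set n v).count a + (if l[n] = a then 1 else 0) = l.count a + (if v = a then 1 else 0) := by
  have hset : l.set n v = l.take n ++ v :: l.drop (n + 1) := by
    rw [List.set_eq_take_append_cons_drop, if_pos h]
  have hl : l = l.take n ++ l[n] :: l.drop (n + 1) := by
    conv_lhs => rw [← List.take_append_drop n l, ← List.getElem_cons_drop h]
  rw [hset]
  conv_rhs => rw [hl]
  simp only [List.count_append, List.count_cons, beq_iff_eq]
  split_ifs <;> omega

theorem swap_perm (a : List Int) (i j : Int) (h0i : 0 ≤ i) (hi : i < a.length)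
    (h0j : 0 ≤ j) (hj : j < a.length) (hij : i ≠ j) : (pySwap a i j).Perm a := by
  rw [List.perm_iff_count]
  intro x
  have hi' : i.toNat < a.length := by omega
  have hj' : j.toNat < a.length := by omega
  unfold pySwap
  rw [PySem.List.pyGetD_eq_getElem a 0 h0j (by exact_mod_cast hj),
      PySem.List.pyGetD_eq_getElem a 0 h0i (by exact_mod_cast hi),
      PySem.List.pySetD_of_nonneg _ _ h0i, PySem.List.pySetD_of_nonneg _ _ h0j]
  have c1 := count_set_add a i.toNat (a[j.toNat]) x hi'
  have c2 := count_set_add (a.set i.toNat a[j.toNat]) j.toNat (a[i.toNat]) x (by simpa using hj')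
  rw [List.getElem_set_ne (by omega)] at c2
  split_ifs at c1 c2 <;> omega

-- ---------- pyRange with a positive step ----------

theorem pyRangePos_nil (a b k : Int) (hk : 0 < k) (h : b ≤ a) : PySem.List.pyRange a b k = [] := by
  rw [PySem.List.pyRange_of_pos _ _ hk, if_neg (by omega)]
  rfl

theorem pyRangePos_cons (a b k : Int) (hk : 0 < k) (h : a < b) :
    PySem.List.pyRange a b k = a :: PySem.List.pyRange (a + k) b k := by
  rw [PySem.List.pyRange_of_pos _ _ hk, PySem.List.pyRange_of_pos _ _ hk, if_pos h]
  have h1 : 1 ≤ (b - a + k - 1) / k := by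
    rw [Int.le_ediv_iff_mul_le hk]; omega
  by_cases h2 : a + k < b
  · rw [if_pos h2]
    have e1 : b - (a + k) + k - 1 = (b - a + k - 1) + (-1) * k := by ring
    have e2 : (b - (a + k) + k - 1) / k = (b - a + k - 1) / k - 1 := by
      rw [e1, Int.add_mul_ediv_right _ _ (by omega)]; omega
    have e3 : ((b - a + k - 1) / k).toNat = ((b - (a + k) + k - 1) / k).toNat + 1 := by omega
    rw [e3, List.range_succ_eq_map]
    simp only [List.map_cons, List.map_map]
    congr 1
    · simp
    · apply List.map_congr_left
      intro t _
      simp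
      push_cast
      ring
  · rw [if_neg h2]
    have e4 : (b - a + k - 1) / k < 2 := by
      exact (Int.ediv_lt_iff_lt_mul hk).mpr (by omega)
    have e5 : ((b - a + k - 1) / k).toNat = 1 := by omega
    rw [e5]
    simp

theorem pyGetD_toNat (a : List Int) (q : Int) (h0 : 0 ≤ q) :
    PySem.List.pyGetD a q 0 = a.getD q.toNat 0 := by
  by_cases h : q < a.length
  · rw [PySem.List.pyGetD_eq_getElem _ _ h0 h, List.getD_eq_getElem _ _ (by omega)]
  · rw [PySem.List.pyGetD_of_none _ _ _ ((PySem.List.pyGet?_eq_none_iff _ _).mpr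
      (by unfold PySem.Raise.InRange; omega))]
    rw [List.getD_eq_getElem?_getD, List.getElem?_eq_none (by omega)]
    rfl

theorem getD_mem_take (a : List Int) (j n : Nat) (hj : j < n) (hn : j < a.length) :
    a.getD j 0 ∈ a.take n := by
  rw [List.getD_eq_getElem _ _ hn]
  have h2 : j < (a.take n).length := by simp; omega
  have : (a.take n)[j]'h2 = a[j]'hn := List.getElem_take
  rw [← this]
  exact List.getElem_mem _

theorem swap_get_fst (a : List Int) (i j : Int) (h0i : 0 ≤ i) (hi : i < a.length)
    (h0j : 0 ≤ j) (hj : j < a.length) (hij : i ≠ j) :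
    PySem.List.pyGetD (pySwap a i j) i 0 = PySem.List.pyGetD a j 0 := by
  unfold pySwap
  rw [pyGetD_pySetD_ne _ _ _ _ h0j (by simp [PySem.List.length_pySetD]; omega) h0i hij,
      pyGetD_pySetD_self _ _ _ h0i hi]

-- ---------- the rotation and its relation to A's inner while-loop ----------

theorem rotBase (a : List Int) (ptr I k : Int) (hk : 1 ≤ k) (h0 : 0 ≤ ptr) (h1 : ptr < I)
    (h2 : I ≤ ptr + k) : rotB a ptr I k = pySwap a ptr I := by
  simp only [rotB]
  rw [pyRangePos_cons _ _ _ (by omega) h1, pyRangePos_nil _ _ _ (by omega) h2]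
  simp [pySwap]

theorem rotStep (a : List Int) (ptr I k : Int) (hk : 1 ≤ k) (h0 : 0 ≤ ptr) (h1 : ptr + k < I)
    (hI : I < a.length) : rotB (pySwap a ptr (ptr + k)) (ptr + k) I k = rotB a ptr I k := by
  have hkpos : (0 : Int) < k := by omega
  have hc1 : PySem.List.pyRange ptr I k = ptr :: PySem.List.pyRange (ptr + k) I k :=
    pyRangePos_cons _ _ _ hkpos (by omega)
  have hc2 : PySem.List.pyRange (ptr + k) I k
      = (ptr + k) :: PySem.List.pyRange (ptr + k + k) I k :=
    pyRangePos_cons _ _ _ hkpos (by omega)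
  obtain ⟨t, T2, hTt⟩ : ∃ t T2, PySem.List.pyRange (ptr + k + k) I k ++ [I] = t :: T2 := by
    cases hL : PySem.List.pyRange (ptr + k + k) I k with
    | nil => exact ⟨I, [], by simp [hL]⟩
    | cons x xs => exact ⟨x, xs ++ [I], by simp [hL]⟩
  have hTmem : ∀ q ∈ t :: T2, ptr + k < q := by
    intro q hq
    rw [← hTt] at hq
    rcases List.mem_append.mp hq with hq | hq
    · have := (PySem.List.mem_pyRange_iff_of_pos hkpos q).mp hq
      omega
    · simp at hq; omega
  have hmapT : (t :: T2).map (fun p => PySem.List.pyGetD (pySwap a ptr (ptr + k)) p 0)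
      = (t :: T2).map (fun p => PySem.List.pyGetD a p 0) := by
    apply List.map_congr_left
    intro q hq
    have hlow := hTmem q hq
    exact swap_get_other a ptr (ptr + k) q h0 (by omega) (by omega) (by omega)
      (by omega) (by omega) (by omega)
  simp only [List.map_cons, List.cons.injEq] at hmapT
  have hvp2 : PySem.List.pyGetD (pySwap a ptr (ptr + k)) (ptr + k) 0
      = PySem.List.pyGetD a ptr 0 := swap_get_snd a _ _ (by omega) (by omega)
  simp only [rotB, hc1, hc2, List.cons_append, hTt]
  simp only [List.map_cons, List.drop_succ_cons, List.drop_zero, List.take_succ_cons,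
    List.take_zero, List.zip_cons_cons, List.foldl_cons, hvp2, hmapT.1, hmapT.2]
  rw [show pySwap a ptr (ptr + k)
      = PySem.List.pySetD (PySem.List.pySetD a ptr (PySem.List.pyGetD a (ptr + k) 0)) (ptr + k)
        (PySem.List.pyGetD a ptr 0) from rfl]
  simp only [List.cons_append, List.zip_cons_cons, List.foldl_cons]
  rw [pySetD_pySetD _ _ _ _ (by omega)]

theorem innerA_stop (fuel : Nat) (a : List Int) (k ptr idx ans : Int) (h : ¬ ptr < idx) :
    innerA fuel a k ptr idx ans = (a, ans) := by
  cases fuel <;> simp [innerA, h]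

theorem cdiv_one (x k : Int) (hk : 1 ≤ k) (h1 : 0 < x) (h2 : x ≤ k) :
    PySem.Int.floordiv (x + k - 1) k = 1 := by
  rw [PySem.Int.floordiv_eq_iff_of_pos (by omega)]; constructor <;> nlinarith

theorem cdiv_zero (k : Int) (hk : 1 ≤ k) : PySem.Int.floordiv (k - 1) k = 0 := by
  rw [PySem.Int.floordiv_eq_iff_of_pos (by omega)]; constructor <;> nlinarith

theorem cdiv_step (x k : Int) (hk : 1 ≤ k) (h : k < x) :
    PySem.Int.floordiv (x + k - 1) k = 1 + PySem.Int.floordiv (x - k + k - 1) k := by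
  rw [PySem.Int.floordiv_eq_ediv_of_pos (by omega), PySem.Int.floordiv_eq_ediv_of_pos (by omega)]
  have e : x + k - 1 = (x - k + k - 1) + 1 * k := by ring
  rw [e, Int.add_mul_ediv_right _ _ (by omega)]
  omega

theorem innerA_rot (k : Int) (hk : 1 ≤ k) :
    ∀ (d : Nat) (a : List Int) (ptr I ans : Int) (fuel : Nat), 0 ≤ ptr → ptr < I → I < a.length →
      (I - ptr).toNat = d → d ≤ fuel →
      innerA fuel a k ptr I ans = (rotB a ptr I k, ans + PySem.Int.floordiv (I - ptr + k - 1) k) := by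
  intro d
  induction d using Nat.strong_induction_on with
  | _ d ih =>
    intro a ptr I ans fuel h0 h1 hI hd hfuel
    have hd1 : 1 ≤ d := by omega
    obtain ⟨f, rfl⟩ : ∃ f, fuel = f + 1 := ⟨fuel - 1, by omega⟩
    simp only [innerA, if_pos h1]
    by_cases hcase : I ≤ ptr + k
    · have harr : (if I < ptr + k then pySwap a ptr I else pySwap a ptr (ptr + k))
          = pySwap a ptr I := by
        by_cases hlt : I < ptr + k
        · rw [if_pos hlt]
        · have : I = ptr + k := by omega
          rw [if_neg hlt, ← this]
      rw [harr, innerA_stop _ _ _ _ _ _ (by omega),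
          rotBase a ptr I k hk h0 h1 hcase, cdiv_one _ _ hk (by omega) (by omega)]
    · rw [if_neg (by omega)]
      have hlen : (pySwap a ptr (ptr + k)).length = a.length := length_pySwap a _ _
      have hrec := ih ((I - (ptr + k)).toNat) (by omega) (pySwap a ptr (ptr + k)) (ptr + k) I
        (ans + 1) f (by omega) (by omega) (by rw [hlen]; exact hI) rfl (by omega)
      rw [hrec, rotStep a ptr I k hk h0 (by omega) hI]
      have harith : PySem.Int.floordiv (I - ptr + k - 1) k
          = 1 + PySem.Int.floordiv (I - (ptr + k) + k - 1) k := by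
        have h2 := cdiv_step (I - ptr) k hk (by omega)
        rw [show I - ptr - k + k - 1 = I - (ptr + k) + k - 1 from by ring] at h2
        exact h2
      rw [harith]
      simp only [Prod.mk.injEq]
      exact ⟨trivial, by ring⟩

theorem rotB_self (a : List Int) (idx k : Int) (hk : 1 ≤ k) (h0 : 0 ≤ idx)
    (hl : idx < a.length) : rotB a idx idx k = a := by
  simp only [rotB, pyRangePos_nil idx idx k (by omega) le_rfl, List.nil_append,
    List.map_cons, List.map_nil, List.drop_succ_cons, List.drop_nil, List.take_succ_cons,
    List.take_nil, List.nil_append, List.zip_cons_cons, List.zip_nil_right, List.foldl_cons,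
    List.foldl_nil]
  rw [PySem.List.pySetD_of_nonneg _ _ h0,
      PySem.List.pyGetD_eq_getElem _ _ h0 hl, List.set_getElem_self]

theorem rotB_desc (k : Int) (hk : 1 ≤ k) :
    ∀ (d : Nat) (a : List Int) (ptr I : Int), 0 ≤ ptr → ptr < I → I < a.length →
      (I - ptr).toNat = d →
      (rotB a ptr I k).Perm a ∧
      PySem.List.pyGetD (rotB a ptr I k) I 0 = PySem.List.pyGetD a ptr 0 ∧
      (∀ q : Int, I < q → q < a.length → PySem.List.pyGetD (rotB a ptr I k) q 0 = PySem.List.pyGetD a q 0) ∧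
      (∀ q : Int, 0 ≤ q → q < I → PySem.List.pyGetD (rotB a ptr I k) q 0 ∈ a.take (I + 1).toNat) := by
  intro d
  induction d using Nat.strong_induction_on with
  | _ d ih =>
    intro a ptr I h0 h1 hI hd
    by_cases hcase : I ≤ ptr + k
    · rw [rotBase a ptr I k hk h0 h1 hcase]
      have hIr : (0:Int) ≤ I := by omega
      refine ⟨swap_perm a ptr I h0 (by omega) (by omega) (by omega) (by omega),
        swap_get_snd a ptr I (by omega) (by omega), ?_, ?_⟩
      · intro q hq hql
        exact swap_get_other a ptr I q h0 (by omega) (by omega) (by omega) (by omega)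
          (by omega) (by omega)
      · intro q hq hqI
        by_cases hqp : q = ptr
        · subst hqp
          rw [swap_get_fst a q I hq (by omega) (by omega) (by omega) (by omega),
              pyGetD_toNat a I (by omega)]
          exact getD_mem_take a I.toNat (I + 1).toNat (by omega) (by omega)
        · rw [swap_get_other a ptr I q h0 (by omega) (by omega) (by omega) hq hqp (by omega),
              pyGetD_toNat a q hq]
          exact getD_mem_take a q.toNat (I + 1).toNat (by omega) (by omega)
    · rw [← rotStep a ptr I k hk h0 (by omega) hI]
      have hlen : (pySwap a ptr (ptr + k)).length = a.length := length_pySwap a _ _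
      obtain ⟨hperm, hat, hhigh, hlow⟩ :=
        ih ((I - (ptr + k)).toNat) (by omega) (pySwap a ptr (ptr + k)) (ptr + k) I
          (by omega) (by omega) (by rw [hlen]; exact hI) rfl
      have hswapperm : (pySwap a ptr (ptr + k)).Perm a :=
        swap_perm a ptr (ptr + k) h0 (by omega) (by omega) (by omega) (by omega)
      refine ⟨hperm.trans hswapperm, ?_, ?_, ?_⟩
      · rw [hat]
        exact swap_get_snd a ptr (ptr + k) (by omega) (by omega)
      · intro q hq hql
        rw [hhigh q hq (by rw [hlen]; exact hql)]
        exact swap_get_other a ptr (ptr + k) q h0 (by omega) (by omega) (by omega) (by omega)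
          (by omega) (by omega)
      · intro q hq hqI
        have hmem := hlow q hq hqI
        set v := PySem.List.pyGetD (rotB (pySwap a ptr (ptr + k)) (ptr + k) I k) q 0 with hv
        have hswap_eq : pySwap a ptr (ptr + k)
            = (a.set ptr.toNat (a.getD (ptr + k).toNat 0)).set (ptr + k).toNat
              (a.getD ptr.toNat 0) := by
          unfold pySwap
          rw [PySem.List.pySetD_of_nonneg _ _ h0, PySem.List.pySetD_of_nonneg _ _ (by omega),
              pyGetD_toNat a (ptr + k) (by omega), pyGetD_toNat a ptr h0]
        rw [hswap_eq, List.take_set, List.take_set] at hmem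
        rcases List.mem_or_eq_of_mem_set hmem with hmem2 | hmem2
        · rcases List.mem_or_eq_of_mem_set hmem2 with hmem3 | hmem3
          · exact hmem3
          · rw [hmem3]
            exact getD_mem_take a (ptr + k).toNat (I + 1).toNat (by omega) (by omega)
        · rw [hmem2]
          exact getD_mem_take a ptr.toNat (I + 1).toNat (by omega) (by omega)

-- ---------- the prefix maximum: A's seeded fold, Python's max(), list.index ----------

theorem fmZero (a : List Int) :
    ∀ (N : Nat), (∀ j, j < N → a.getD j 0 ≤ 0) →
      ((PySem.List.pyRange 0 (N : Int) 1).foldl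
        (fun s i => if s.1 < PySem.List.pyGetD a i 0 then (PySem.List.pyGetD a i 0, i) else s)
        (0, -1)) = (0, -1) := by
  intro N
  induction N with
  | zero => intro _; rfl
  | succ N ihN =>
    intro hle
    rw [show ((N + 1 : Nat) : Int) = (N : Int) + 1 from by push_cast; ring,
        PySem.List.pyRange_one_succ_right (by omega), List.foldl_append,
        ihN (fun j hj => hle j (by omega))]
    simp only [List.foldl_cons, List.foldl_nil, PySem.List.pyGetD_natCast]
    rw [if_neg (by have := hle N (by omega); omega)]

theorem fmAux (a : List Int) :
    ∀ (N : Nat), N ≤ a.length → (∃ j, j < N ∧ 0 < a.getD j 0) →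
      ∃ t, t < N ∧
        ((PySem.List.pyRange 0 (N : Int) 1).foldl
          (fun s i => if s.1 < PySem.List.pyGetD a i 0 then (PySem.List.pyGetD a i 0, i) else s)
          (0, -1)) = (a.getD t 0, (t : Int)) ∧
        (∀ j, j < N → a.getD j 0 ≤ a.getD t 0) ∧
        (∀ j, j < t → a.getD j 0 < a.getD t 0) := by
  intro N
  induction N with
  | zero => rintro _ ⟨j, hj, -⟩; omega
  | succ N ihN =>
    intro hN hex
    rw [show ((N + 1 : Nat) : Int) = (N : Int) + 1 from by push_cast; ring,
        PySem.List.pyRange_one_succ_right (by omega), List.foldl_append]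
    by_cases hpos : ∃ j, j < N ∧ 0 < a.getD j 0
    · obtain ⟨t, ht, heq, hbound, hstrict⟩ := ihN (by omega) hpos
      rw [heq]
      simp only [List.foldl_cons, List.foldl_nil, PySem.List.pyGetD_natCast]
      by_cases hc : a.getD t 0 < a.getD N 0
      · rw [if_pos hc]
        refine ⟨N, by omega, rfl, fun j hj => ?_, fun j hj => ?_⟩
        · rcases Nat.lt_or_ge j N with h | h
          · have := hbound j h; omega
          · have : j = N := by omega
            rw [this]
        · have := hbound j hj; omega
      · rw [if_neg hc]
        exact ⟨t, by omega, rfl, fun j hj => by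
          rcases Nat.lt_or_ge j N with h | h
          · exact hbound j h
          · have : j = N := by omega
            rw [this]; omega, hstrict⟩
    · have hzero : ∀ j, j < N → a.getD j 0 ≤ 0 := by
        intro j hj
        by_contra hcon
        exact hpos ⟨j, hj, by omega⟩
      obtain ⟨j0, hj0, hj0pos⟩ := hex
      have hj0N : j0 = N := by
        by_contra hne
        have := hzero j0 (by omega)
        omega
      subst hj0N
      rw [fmZero a j0 hzero]
      simp only [List.foldl_cons, List.foldl_nil, PySem.List.pyGetD_natCast]
      rw [if_pos (by omega)]
      refine ⟨j0, by omega, rfl, fun j hj => ?_, fun j hj => ?_⟩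
      · rcases Nat.lt_or_ge j j0 with h | h
        · have := hzero j h; omega
        · have : j = j0 := by omega
          rw [this]
      · have := hzero j hj; omega

theorem index?_leftmost (a : List Int) (t : Nat) (ht : t < a.length)
    (hs : ∀ j, j < t → a.getD j 0 < a.getD t 0) :
    (PySem.List.index? a (a.getD t 0)).getD 0 = t := by
  have hsplit : a = a.take t ++ a.getD t 0 :: a.drop (t + 1) := by
    rw [List.getD_eq_getElem _ _ ht]
    conv_lhs => rw [← List.take_append_drop t a, ← List.getElem_cons_drop ht]
  have hnotmem : a.getD t 0 ∉ a.take t := by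
    intro hmem
    obtain ⟨j, hj, hje⟩ := List.mem_iff_getElem.mp hmem
    have hjt : j < t := by simp at hj; omega
    rw [List.getElem_take] at hje
    have := hs j hjt
    rw [List.getD_eq_getElem _ _ (by omega)] at this
    omega
  have : PySem.List.index? a (a.getD t 0) = some t :=
    (PySem.List.index?_eq_some_iff a _ t).mpr
      ⟨a.take t, a.drop (t + 1), hsplit, by simp; omega, hnotmem⟩
  rw [this]
  rfl

theorem max?_take (a : List Int) (t n : Nat) (ht : t < n) (hn : n ≤ a.length)
    (hmax : ∀ j, j < n → a.getD j 0 ≤ a.getD t 0) :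
    (PySem.List.max? (a.take n) (fun x => x)).getD 0 = a.getD t 0 := by
  cases hmx : PySem.List.max? (a.take n) (fun x => x) with
  | none =>
    rw [PySem.List.max?_eq_none_iff] at hmx
    have h0 : min n a.length = 0 := by simpa using congrArg List.length hmx
    omega
  | some m =>
    have hub := PySem.List.max?_isMax hmx
    have hmem := PySem.List.max?_mem hmx
    obtain ⟨j, hj, hje⟩ := List.mem_iff_getElem.mp hmem
    have hjn : j < n := by simp at hj; omega
    have hjl : j < a.length := by simp at hj; omega
    rw [List.getElem_take] at hje
    have h1 : m ≤ a.getD t 0 := by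
      rw [← hje, ← List.getD_eq_getElem _ _ hjl]
      exact hmax j hjn
    have h2 : a.getD t 0 ≤ m := hub _ (getD_mem_take a t n ht (by omega))
    simp only [Option.getD_some]
    omega

-- ---------- the selection invariant ----------

-- everything strictly right of position idx is ≥ everything left of it and sorted among itself
def SelInv (a : List Int) (idx : Int) : Prop :=
  ∀ i j : Int, 0 ≤ i → i < j → j < a.length → idx < j →
    PySem.List.pyGetD a i 0 ≤ PySem.List.pyGetD a j 0

theorem not_sorted_viol (a : List Int) (h : ¬ isSortedA a = true) :
    ∃ i j : Nat, i < j ∧ j < a.length ∧ a.getD j 0 < a.getD i 0 := by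
  rw [isSortedA_iff, List.pairwise_iff_getElem] at h
  push_neg at h
  obtain ⟨i, j, hi, hj, hij, hlt⟩ := h
  exact ⟨i, j, hij, hj, by
    rw [List.getD_eq_getElem _ _ hj, List.getD_eq_getElem _ _ hi]; omega⟩

theorem inv_step (a r : List Int) (idx ptr : Int) (hinv : SelInv a idx)
    (hlen : r.length = a.length) (h1 : 1 ≤ idx) (hidx : idx < a.length)
    (h0p : 0 ≤ ptr) (hp : ptr ≤ idx)
    (hmax : ∀ q : Int, 0 ≤ q → q ≤ idx → PySem.List.pyGetD a q 0 ≤ PySem.List.pyGetD a ptr 0)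
    (hI : PySem.List.pyGetD r idx 0 = PySem.List.pyGetD a ptr 0)
    (hhigh : ∀ q : Int, idx < q → q < a.length → PySem.List.pyGetD r q 0 = PySem.List.pyGetD a q 0)
    (hlow : ∀ q : Int, 0 ≤ q → q < idx → PySem.List.pyGetD r q 0 ∈ a.take (idx + 1).toNat) :
    SelInv r (idx - 1) := by
  intro i j h0i hij hjlen hnj
  rw [hlen] at hjlen
  have hmemA : ∀ q : Int, 0 ≤ q → q < idx → ∃ q0 : Nat, (q0 : Int) ≤ idx ∧ q0 < a.length ∧
      PySem.List.pyGetD r q 0 = PySem.List.pyGetD a (q0 : Int) 0 := by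
    intro q hq0 hq
    obtain ⟨j0, hj0, hje⟩ := List.mem_iff_getElem.mp (hlow q hq0 hq)
    have hj0n : (j0 : Int) < idx + 1 := by simp at hj0; omega
    have hj0l : j0 < a.length := by simp at hj0; omega
    rw [List.getElem_take] at hje
    refine ⟨j0, by omega, hj0l, ?_⟩
    rw [← hje, PySem.List.pyGetD_natCast, List.getD_eq_getElem _ _ hj0l]
  by_cases hj : idx < j
  · rw [hhigh j hj hjlen]
    by_cases hi : idx < i
    · rw [hhigh i hi (by omega)]
      exact hinv i j h0i hij hjlen hj
    · by_cases hieq : i = idx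
      · rw [hieq, hI]
        exact hinv ptr j h0p (by omega) hjlen hj
      · obtain ⟨q0, hq0idx, hq0l, hq0e⟩ := hmemA i h0i (by omega)
        rw [hq0e]
        exact hinv (q0 : Int) j (by omega) (by omega) hjlen hj
  · have hjeq : j = idx := by omega
    rw [hjeq, hI]
    obtain ⟨q0, hq0idx, hq0l, hq0e⟩ := hmemA i h0i (by omega)
    rw [hq0e]
    exact hmax (q0 : Int) (by omega) hq0idx

-- ---------- one-step unfoldings ----------

theorem outerA_succ (f : Nat) (arr : List Int) (k idx answer : Int) :
    outerA (f + 1) arr k idx answer =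
      if isSortedA arr then answer
      else
        outerA f (innerA (arr.length + 1) arr k (findMaxA arr idx).2 idx answer).1 k (idx - 1)
          (innerA (arr.length + 1) arr k (findMaxA arr idx).2 idx answer).2 := rfl

theorem outerB_succ (f : Nat) (a : List Int) (k idx answer : Int) :
    outerB (f + 1) a k idx answer =
      if isSortedA a then answer
      else
        outerB f
          (rotB a (((PySem.List.index? a
              ((PySem.List.max? (PySem.List.slice a none (some (idx + 1))) (fun x => x)).getD 0)).getD 0 : Nat))
            idx k) k (idx - 1)
          (answer + PySem.Int.floordiv
            (idx - (((PySem.List.index? a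
              ((PySem.List.max? (PySem.List.slice a none (some (idx + 1))) (fun x => x)).getD 0)).getD 0 : Nat)) + k - 1) k) := rfl

-- ---------- the main induction ----------

theorem loop_eq (k : Int) (hk : 1 ≤ k) :
    ∀ (fuel : Nat) (a : List Int) (idx ans : Int), (∀ x ∈ a, 0 ≤ x) → SelInv a idx →
      idx < (a.length : Int) →
      outerA fuel a k idx ans = outerB fuel a k idx ans := by
  intro fuel
  induction fuel with
  | zero => intro a idx ans _ _ _; rfl
  | succ f ihf =>
    intro a idx ans hnn hinv hidx
    rw [outerA_succ, outerB_succ]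
    by_cases hsort : isSortedA a = true
    · rw [if_pos hsort, if_pos hsort]
    · rw [if_neg hsort, if_neg hsort]
      -- the offending pair lies inside the prefix, so the prefix has a positive element
      obtain ⟨vi, vj, hvij, hvjl, hvlt⟩ := not_sorted_viol a hsort
      have hgets : ∀ (q : Nat) (hq : q < a.length), a.getD q 0 = a[q]'hq := fun q hq =>
        List.getD_eq_getElem _ _ hq
      have hvj_le : (vj : Int) ≤ idx := by
        by_contra hcon
        have := hinv (vi : Int) (vj : Int) (by omega) (by exact_mod_cast hvij)
          (by exact_mod_cast hvjl) (by omega)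
        rw [PySem.List.pyGetD_natCast, PySem.List.pyGetD_natCast] at this
        omega
      have hidx1 : 1 ≤ idx := by omega
      have hvi_pos : 0 < a.getD vi 0 := by
        have h1 : 0 ≤ a.getD vj 0 := by
          rw [hgets vj hvjl]; exact hnn _ (List.getElem_mem _)
        omega
      set N : Nat := (idx + 1).toNat with hN
      have hNlen : N ≤ a.length := by omega
      have hNcast : ((N : Nat) : Int) = idx + 1 := by omega
      obtain ⟨t, htN, hfold, hbound, hstrict⟩ := fmAux a N hNlen
        ⟨vi, by omega, hvi_pos⟩
      have hfm : findMaxA a idx = (a.getD t 0, (t : Int)) := by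
        unfold findMaxA
        rw [show idx + 1 = ((N : Nat) : Int) from hNcast.symm]
        exact hfold
      have htlen : t < a.length := by omega
      have hmaxval : (PySem.List.max? (PySem.List.slice a none (some (idx + 1))) (fun x => x)).getD 0
          = a.getD t 0 := by
        rw [PySem.List.slice_to _ (by omega)]
        exact max?_take a t N htN hNlen hbound
      have hptr : ((PySem.List.index? a ((PySem.List.max? (PySem.List.slice a none (some (idx + 1)))
          (fun x => x)).getD 0)).getD 0 : Nat) = t := by
        rw [hmaxval]
        exact index?_leftmost a t htlen hstrict
      rw [hfm, hptr]
      simp only []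
      have hmaxq : ∀ q : Int, 0 ≤ q → q ≤ idx → PySem.List.pyGetD a q 0 ≤ PySem.List.pyGetD a (t : Int) 0 := by
        intro q hq0 hq
        rw [PySem.List.pyGetD_natCast, pyGetD_toNat a q hq0]
        exact hbound q.toNat (by omega)
      by_cases hteq : (t : Int) = idx
      · -- the prefix maximum already sits at idx: both passes are no-ops on the state
        rw [hteq, innerA_stop _ _ _ _ _ _ (by omega), rotB_self a idx k hk (by omega) (by omega)]
        simp only []
        rw [show idx - idx + k - 1 = k - 1 from by ring, cdiv_zero k hk, add_zero]
        have hinv' : SelInv a (idx - 1) :=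
          inv_step a a idx idx hinv rfl hidx1 (by omega) (by omega) le_rfl
            (fun q hq0 hq => by rw [← hteq]; exact hmaxq q hq0 hq)
            rfl (fun q _ _ => rfl)
            (fun q hq0 hq => by
              rw [pyGetD_toNat a q hq0]
              exact getD_mem_take a q.toNat (idx + 1).toNat (by omega) (by omega))
        exact ihf a (idx - 1) ans hnn hinv' (by omega)
      · have htlt : (t : Int) < idx := by omega
        have hinner := innerA_rot k hk ((idx - (t : Int)).toNat) a (t : Int) idx ans
          (a.length + 1) (by omega) htlt (by omega) rfl (by omega)
        rw [hinner]
        obtain ⟨hperm, hat, hhigh, hlow⟩ :=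
          rotB_desc k hk ((idx - (t : Int)).toNat) a (t : Int) idx (by omega) htlt (by omega) rfl
        set rot := rotB a (t : Int) idx k with hrot
        have hlenr : rot.length = a.length := hperm.length_eq
        have hnnr : ∀ x ∈ rot, 0 ≤ x := fun x hx => hnn x (hperm.mem_iff.mp hx)
        have hinv' : SelInv rot (idx - 1) :=
          inv_step a rot idx (t : Int) hinv hlenr hidx1 (by omega) (by omega) (by omega)
            hmaxq hat hhigh hlow
        simp only []
        exact ihf rot (idx - 1) _ hnnr hinv' (by rw [hlenr]; omega)

-- ===== VERDICT (by name: the statement is the Claim_ definition above) =====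
theorem solution_spec : Claim_equal_solution := by
  intro arr k hdom hpre
  unfold Spec_solution
  obtain ⟨hne, hcase⟩ := hpre
  have hlen : 1 ≤ arr.length := List.length_pos_iff.mpr hne
  unfold solution solution_alt
  rw [PySem.List.len_eq]
  rcases hcase with hsorted | ⟨hk, hnn⟩
  · obtain ⟨f, hf⟩ : ∃ f, arr.length + 1 = f + 1 := ⟨arr.length, rfl⟩
    rw [hf, outerA_succ, outerB_succ, if_pos ((isSortedA_iff arr).mpr hsorted),
        if_pos ((isSortedA_iff arr).mpr hsorted)]
  · have hinv0 : SelInv arr ((arr.length : Int) - 1) := by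
      intro i j h0i hij hjl hnj
      exfalso
      omega
    exact loop_eq k hk (arr.length + 1) arr ((arr.length : Int) - 1) 0 hnn hinv0 (by omega)
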